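-- pv_equiv track=rewrite | github.com/ZJU-PL/aria | aria/bool/analysis/cnf.py | _primal_graph
-- ===== SOURCE A (Python) =====
-- from typing import Dict, Iterable, Set
--
-- def _primal_graph(clauses: Iterable[Iterable[int]]) -> Dict[int, Set[int]]:
--     graph: Dict[int, Set[int]] = {}
--     for clause in clauses:
--         variables = sorted({abs(literal) for literal in clause})
--         for variable in variables:
--             graph.setdefault(variable, set())
--         for index, left in enumerate(variables):
--             for right in variables[index + 1 :]:
--                 graph[left].add(right)
--                 graph[right].add(left)
--     return graph
-- ===== SOURCE B (Python) =====
-- def _primal_graph(clauses):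
--     # Phase 1: inverted occurrence index, variable -> list of clause variable-lists containing it.
--     occurrences = {}
--     for clause in clauses:
--         vs = sorted({abs(literal) for literal in clause})
--         for v in vs:
--             occurrences.setdefault(v, []).append(vs)
--     # Phase 2: each node's whole neighborhood is computed at once from its occurrence list.
--     graph = {}
--     for v, groups in occurrences.items():
--         neighbors = set()
--         for vs in groups:
--             neighbors.update(w for w in vs if w != v)
--         graph[v] = neighbors
--     return graph
-- ===== Notes on version B (the rewrite author's own statement) =====
-- stated objective: alternative
-- what changed: B builds the graph in two staged passes via an inverted occurrence index (variable -> list of clause variable-sets), then computes each node's entire neighborhood at once by unioning its occurrence list, instead of A's per-clause node-initialization pass plus nested pairwise index loop with symmetric edge insertions.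
import Mathlib
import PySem

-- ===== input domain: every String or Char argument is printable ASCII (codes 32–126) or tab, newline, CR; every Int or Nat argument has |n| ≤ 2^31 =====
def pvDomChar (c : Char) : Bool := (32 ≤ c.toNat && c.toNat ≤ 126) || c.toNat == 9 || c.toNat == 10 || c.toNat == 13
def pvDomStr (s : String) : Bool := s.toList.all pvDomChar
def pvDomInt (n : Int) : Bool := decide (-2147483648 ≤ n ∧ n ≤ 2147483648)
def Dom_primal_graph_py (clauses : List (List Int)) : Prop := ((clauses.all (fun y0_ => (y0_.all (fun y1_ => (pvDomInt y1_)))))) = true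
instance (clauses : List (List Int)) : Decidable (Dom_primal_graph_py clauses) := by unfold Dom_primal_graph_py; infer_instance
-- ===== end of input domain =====

-- B replaces A's per-clause node-initialization pass plus nested pairwise index loop by two
-- staged passes: an inverted occurrence index (variable -> clause variable-lists), then one
-- whole-neighborhood union per variable (objective: alternative decomposition, same cost).

-- ===== PORT A =====
-- graph[left].add(right); graph[right].add(left): both keys are always present here
-- (setdefault'd just before), so modelling the `graph[k]` lookup with modify's default ∅ is exact.
def pgA_pairStep (g : PySem.Dict Int (PySem.Set Int)) (left right : Int) :
    PySem.Dict Int (PySem.Set Int) :=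
  (g.modify left PySem.Set.empty (fun s => s.add right)).modify right PySem.Set.empty
    (fun s => s.add left)

-- Python's local `variables` is spelled `vars` here (`variables` is reserved in Lean 4)
def pgA_clauseStep (g : PySem.Dict Int (PySem.Set Int)) (clause : List Int) :
    PySem.Dict Int (PySem.Set Int) :=
  let vars := PySem.List.sorted (PySem.Set.ofList (clause.map (fun literal => |literal|))) (fun x => x) false
  let g1 := vars.foldl (fun g v => g.setdefault v PySem.Set.empty) g
  (PySem.List.enumerate vars).foldl
    (fun g p => (PySem.List.slice vars (some (p.1 + 1)) none).foldl
      (fun g right => pgA_pairStep g p.2 right) g) g1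

def primal_graph_py (clauses : List (List Int)) : List (Int × List Int) :=
  (clauses.foldl pgA_clauseStep PySem.Dict.empty).items

-- ===== PORT B =====
-- phase 1: occurrences.setdefault(v, []).append(vs)  =  modify v [] (· ++ [vs])
def pgB_occStep (occ : PySem.Dict Int (List (List Int))) (clause : List Int) :
    PySem.Dict Int (List (List Int)) :=
  let vs := PySem.List.sorted (PySem.Set.ofList (clause.map (fun literal => |literal|))) (fun x => x) false
  vs.foldl (fun occ v => occ.modify v [] (fun l => l ++ [vs])) occ

-- neighbors = set(); for vs in groups: neighbors.update(w for w in vs if w != v)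
def pgB_neighbors (v : Int) (groups : List (List Int)) : PySem.Set Int :=
  groups.foldl (fun nb vs => PySem.Set.update nb (vs.filter (fun w => !(w == v)))) PySem.Set.empty

def primal_graph_py_alt (clauses : List (List Int)) : List (Int × List Int) :=
  let occ := clauses.foldl pgB_occStep PySem.Dict.empty
  let graph := occ.items.foldl (fun g p => g.insert p.1 (pgB_neighbors p.1 p.2)) PySem.Dict.empty
  graph.items

-- ===== PRECONDITION & SPEC =====
def Spec_primal_graph_py (clauses : List (List Int)) (out : List (Int × List Int)) : Prop := out = primal_graph_py_alt clauses
instance (clauses : List (List Int)) (out : List (Int × List Int)) : Decidable (Spec_primal_graph_py clauses out) := by unfold Spec_primal_graph_py; infer_instance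

-- ===== CLAIM (what is proved, stated in full; the proofs are below) =====
def Claim_equal_primal_graph_py : Prop := ∀ (clauses : List (List Int)), Dom_primal_graph_py clauses → Spec_primal_graph_py clauses (primal_graph_py clauses)

-- ===== LEMMAS AND PROOFS =====

-- the sorted variable set of one clause (shared vocabulary of the proofs; both ports inline it)
def pgVars (clause : List Int) : List Int :=
  PySem.List.sorted (PySem.Set.ofList (clause.map (fun literal => |literal|))) (fun x => x) false

-- canonical key list and canonical neighborhood of one key
def pgKeys (clauses : List (List Int)) : List Int :=
  clauses.foldl (fun ks c => PySem.Set.update ks (pgVars c)) []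

def pgNb (clauses : List (List Int)) (k : Int) : PySem.Set Int :=
  clauses.foldl
    (fun s c => if k ∈ pgVars c then PySem.Set.update s ((pgVars c).filter (fun w => !(w == k))) else s)
    PySem.Set.empty

theorem nodup_pgVars (c : List Int) : (pgVars c).Nodup :=
  (PySem.List.sorted_perm _ _ _).nodup_iff.mpr (PySem.Set.nodup_ofList _)

-- Set helpers
theorem set_add_of_mem {s : PySem.Set Int} {x : Int} (h : x ∈ s) : s.add x = s := by
  simp [PySem.Set.add, PySem.Set.contains, h]

theorem set_add_of_not_mem {s : PySem.Set Int} {x : Int} (h : ¬ x ∈ s) : s.add x = s ++ [x] := by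
  simp [PySem.Set.add, PySem.Set.contains, h]

theorem set_update_cons (s : PySem.Set Int) (x : Int) (xs : List Int) :
    PySem.Set.update s (x :: xs) = PySem.Set.update (s.add x) xs := rfl

theorem nodup_set_add {s : PySem.Set Int} (h : s.Nodup) (x : Int) : (s.add x).Nodup := by
  by_cases hx : x ∈ s
  · rwa [set_add_of_mem hx]
  · rw [set_add_of_not_mem hx]
    simp [List.nodup_append, h]
    exact fun a ha hax => hx (hax ▸ ha)

theorem nodup_set_update {s : PySem.Set Int} (h : s.Nodup) (xs : List Int) :
    (PySem.Set.update s xs).Nodup := by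
  induction xs generalizing s with
  | nil => exact h
  | cons x xs ih => rw [set_update_cons]; exact ih (nodup_set_add h x)

theorem mem_set_add_self (s : PySem.Set Int) (x : Int) : x ∈ s.add x :=
  (PySem.Set.mem_add s x x).mpr (Or.inr rfl)

theorem mem_set_add_of_mem {s : PySem.Set Int} {y : Int} (h : y ∈ s) (x : Int) : y ∈ s.add x :=
  (PySem.Set.mem_add s x y).mpr (Or.inl h)

theorem mem_set_update_of_mem {x : Int} {s : PySem.Set Int} (h : x ∈ s) (ys : List Int) :
    x ∈ PySem.Set.update s ys := by
  induction ys generalizing s with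
  | nil => exact h
  | cons y ys ih => rw [set_update_cons]; exact ih (mem_set_add_of_mem h y)

theorem mem_set_update_of_mem_list {x : Int} {xs : List Int} (h : x ∈ xs) (s : PySem.Set Int) :
    x ∈ PySem.Set.update s xs := by
  induction xs generalizing s with
  | nil => cases h
  | cons y ys ih =>
    rw [set_update_cons]
    rcases List.mem_cons.mp h with h | h
    · subst h
      exact mem_set_update_of_mem (mem_set_add_self s x) ys
    · exact ih h _

theorem nodup_pgKeys_fold :
    ∀ (clauses : List (List Int)) (ks : List Int), ks.Nodup →
      (clauses.foldl (fun ks c => PySem.Set.update ks (pgVars c)) ks).Nodup := by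
  intro clauses
  induction clauses with
  | nil => intro ks h; exact h
  | cons c cs ih => intro ks h; exact ih _ (nodup_set_update h _)

-- the pairwise double loop, as structural recursion on the (sorted) variable list
def pairRec : List Int → PySem.Dict Int (PySem.Set Int) → PySem.Dict Int (PySem.Set Int)
  | [], g => g
  | v :: rest, g => pairRec rest (rest.foldl (fun g r => pgA_pairStep g v r) g)

theorem enumFold_eq_pairRec (full : List Int) :
    ∀ (tail : List Int) (k : Nat) (g : PySem.Dict Int (PySem.Set Int)),
      full.drop k = tail →
      (PySem.List.enumerate tail (k : Int)).foldl
        (fun g p => (PySem.List.slice full (some (p.1 + 1)) none).foldl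
          (fun g right => pgA_pairStep g p.2 right) g) g = pairRec tail g := by
  intro tail
  induction tail with
  | nil => intro k g _; simp [pairRec, PySem.List.enumerate]
  | cons v rest ih =>
    intro k g hdrop
    rw [PySem.List.enumerate_cons]
    have hk1 : ((k : Int) + 1) = ((k + 1 : Nat) : Int) := by push_cast; ring
    have hdrop' : full.drop (k + 1) = rest := by
      rw [← List.drop_drop, hdrop]; rfl
    have hslice : PySem.List.slice full (some ((k : Int) + 1)) none = rest := by
      rw [PySem.List.slice_from full (by positivity), hk1, Int.toNat_natCast, hdrop']
    simp only [List.foldl_cons]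
    rw [hslice, hk1, ih (k + 1) _ hdrop']
    rfl

-- value of one inner pass (fixed left = v, all rights from rest)
theorem innerFold_getD (v : Int) (rest : List Int) (hv : v ∉ rest) :
    ∀ (g : PySem.Dict Int (PySem.Set Int)) (k : Int),
      (rest.foldl (fun g r => pgA_pairStep g v r) g).getD k PySem.Set.empty =
        if k = v then PySem.Set.update (g.getD v PySem.Set.empty) rest
        else if k ∈ rest then (g.getD k PySem.Set.empty).add v
        else g.getD k PySem.Set.empty := by
  induction rest with
  | nil => intro g k; by_cases hk : k = v <;> simp [hk, PySem.Set.update]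
  | cons r rs ih =>
    intro g k
    have hvr : v ≠ r := fun h => hv (h ▸ List.mem_cons_self ..)
    have hv' : v ∉ rs := fun h => hv (List.mem_cons_of_mem _ h)
    have hstep : ∀ k', (pgA_pairStep g v r).getD k' PySem.Set.empty =
        if k' = v then (g.getD v PySem.Set.empty).add r
        else if k' = r then (g.getD k' PySem.Set.empty).add v
        else g.getD k' PySem.Set.empty := by
      intro k'
      unfold pgA_pairStep
      rw [PySem.Dict.getD_modify, PySem.Dict.getD_modify]
      by_cases h1 : k' = v
      · subst h1; simp [hvr]
      · by_cases h2 : k' = r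
        · subst h2; simp [h1]
        · simp [h1, h2, PySem.Dict.getD_modify]
    simp only [List.foldl_cons]
    rw [ih hv' (pgA_pairStep g v r) k]
    simp only [hstep]
    by_cases h1 : k = v
    · subst h1
      simp
    · by_cases h2 : k = r
      · subst h2
        by_cases h3 : k ∈ rs <;> simp [h1, h3]
      · by_cases h3 : k ∈ rs <;> simp [h1, h2, h3]

theorem pairRec_getD :
    ∀ (vs : List Int), vs.Nodup →
      ∀ (g : PySem.Dict Int (PySem.Set Int)) (k : Int),
        (pairRec vs g).getD k PySem.Set.empty =
          if k ∈ vs then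
            PySem.Set.update (g.getD k PySem.Set.empty) (vs.filter (fun w => !(w == k)))
          else g.getD k PySem.Set.empty := by
  intro vs
  induction vs with
  | nil => intro _ g k; simp [pairRec]
  | cons v rest ih =>
    intro hnd g k
    have hv : v ∉ rest := (List.nodup_cons.mp hnd).1
    have hnd' : rest.Nodup := (List.nodup_cons.mp hnd).2
    show (pairRec rest _).getD k PySem.Set.empty = _
    rw [ih hnd', innerFold_getD v rest hv g k]
    by_cases h1 : k = v
    · subst h1
      have hfil : (k :: rest).filter (fun w => !(w == k)) = rest := by
        rw [List.filter_cons_of_neg (by simp)]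
        exact List.filter_eq_self.mpr (fun w hw => by
          simpa using fun h : w = k => hv (h ▸ hw))
      simp [hv, hfil]
    · by_cases h2 : k ∈ rest
      · have hfil : (v :: rest).filter (fun w => !(w == k)) =
            v :: rest.filter (fun w => !(w == k)) := by
          simp [Ne.symm h1]
        simp [h1, h2, hfil]
      · simp [List.mem_cons, h1, h2]

theorem pairStep_keys (g : PySem.Dict Int (PySem.Set Int)) (l r : Int)
    (hl : l ∈ g.keys) (hr : r ∈ g.keys) : (pgA_pairStep g l r).keys = g.keys := by
  unfold pgA_pairStep
  rw [PySem.Dict.keys_modify, PySem.Dict.keys_insert_of_contains _ _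
        (by rw [PySem.Dict.contains_iff_mem_keys]
            rw [PySem.Dict.keys_modify, PySem.Dict.keys_insert_of_contains _ _
                  ((PySem.Dict.contains_iff_mem_keys g l).mpr hl)]
            exact hr),
      PySem.Dict.keys_modify, PySem.Dict.keys_insert_of_contains _ _
        ((PySem.Dict.contains_iff_mem_keys g l).mpr hl)]

theorem innerFold_keys (v : Int) :
    ∀ (rest : List Int) (g : PySem.Dict Int (PySem.Set Int)), v ∈ g.keys →
      (∀ r ∈ rest, r ∈ g.keys) →
      (rest.foldl (fun g r => pgA_pairStep g v r) g).keys = g.keys := by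
  intro rest
  induction rest with
  | nil => intro g _ _; rfl
  | cons r rs ih =>
    intro g hv hr
    have hkeys := pairStep_keys g v r hv (hr r (List.mem_cons_self ..))
    simp only [List.foldl_cons]
    rw [ih _ (hkeys ▸ hv) (fun x hx => hkeys ▸ hr x (List.mem_cons_of_mem _ hx)), hkeys]

theorem pairRec_keys :
    ∀ (vs : List Int) (g : PySem.Dict Int (PySem.Set Int)),
      (∀ x ∈ vs, x ∈ g.keys) → (pairRec vs g).keys = g.keys := by
  intro vs
  induction vs with
  | nil => intro g _; rfl
  | cons v rest ih =>
    intro g h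
    show (pairRec rest _).keys = g.keys
    have hin := innerFold_keys v rest g (h v (List.mem_cons_self ..))
      (fun r hr => h r (List.mem_cons_of_mem _ hr))
    rw [ih _ (fun x hx => hin ▸ h x (List.mem_cons_of_mem _ hx)), hin]

theorem sdFold_keys :
    ∀ (vs : List Int) (g : PySem.Dict Int (PySem.Set Int)),
      (vs.foldl (fun g v => g.setdefault v PySem.Set.empty) g).keys =
        PySem.Set.update g.keys vs := by
  intro vs
  induction vs with
  | nil => intro g; rfl
  | cons v rest ih =>
    intro g
    simp only [List.foldl_cons]
    rw [ih, set_update_cons]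
    congr 1
    rw [PySem.Dict.keys_setdefault]
    by_cases h : v ∈ g.keys
    · rw [if_pos ((PySem.Dict.contains_iff_mem_keys g v).mpr h), set_add_of_mem h]
    · rw [if_neg (fun hc => h ((PySem.Dict.contains_iff_mem_keys g v).mp hc)),
        set_add_of_not_mem h]

theorem sdFold_getD :
    ∀ (vs : List Int) (g : PySem.Dict Int (PySem.Set Int)) (k : Int),
      (vs.foldl (fun g v => g.setdefault v PySem.Set.empty) g).getD k PySem.Set.empty =
        g.getD k PySem.Set.empty := by
  intro vs
  induction vs with
  | nil => intro g k; rfl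
  | cons v rest ih =>
    intro g k
    simp only [List.foldl_cons]
    rw [ih]
    by_cases h : k = v
    · subst h; exact PySem.Dict.getD_setdefault_self g k _ _
    · rw [PySem.Dict.getD_eq_get?_getD, PySem.Dict.get?_setdefault_of_ne g _ h,
        ← PySem.Dict.getD_eq_get?_getD]

-- one A-clause step in pairRec form
theorem clauseStepA_eq (g : PySem.Dict Int (PySem.Set Int)) (c : List Int) :
    pgA_clauseStep g c =
      pairRec (pgVars c) ((pgVars c).foldl (fun g v => g.setdefault v PySem.Set.empty) g) := by
  simp only [pgA_clauseStep, pgVars]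
  set vars := PySem.List.sorted (PySem.Set.ofList (c.map (fun literal => |literal|))) (fun x => x) false with hv
  have h := enumFold_eq_pairRec vars vars 0
    (vars.foldl (fun g v => g.setdefault v PySem.Set.empty) g) rfl
  simp only [Nat.cast_zero] at h
  exact h

theorem clauseStepA_keys (g : PySem.Dict Int (PySem.Set Int)) (c : List Int) :
    (pgA_clauseStep g c).keys = PySem.Set.update g.keys (pgVars c) := by
  rw [clauseStepA_eq, pairRec_keys _ _ (fun x hx => by
      rw [sdFold_keys]; exact mem_set_update_of_mem_list hx _), sdFold_keys]

theorem clauseStepA_getD (g : PySem.Dict Int (PySem.Set Int)) (c : List Int) (k : Int) :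
    (pgA_clauseStep g c).getD k PySem.Set.empty =
      if k ∈ pgVars c then
        PySem.Set.update (g.getD k PySem.Set.empty) ((pgVars c).filter (fun w => !(w == k)))
      else g.getD k PySem.Set.empty := by
  rw [clauseStepA_eq, pairRec_getD _ (nodup_pgVars c), sdFold_getD]

theorem foldA_keys :
    ∀ (clauses : List (List Int)) (g : PySem.Dict Int (PySem.Set Int)),
      (clauses.foldl pgA_clauseStep g).keys =
        clauses.foldl (fun ks c => PySem.Set.update ks (pgVars c)) g.keys := by
  intro clauses
  induction clauses with
  | nil => intro g; rfl
  | cons c cs ih => intro g; simp only [List.foldl_cons]; rw [ih, clauseStepA_keys]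

theorem foldA_getD :
    ∀ (clauses : List (List Int)) (g : PySem.Dict Int (PySem.Set Int)) (k : Int),
      (clauses.foldl pgA_clauseStep g).getD k PySem.Set.empty =
        clauses.foldl
          (fun s c => if k ∈ pgVars c then
              PySem.Set.update s ((pgVars c).filter (fun w => !(w == k))) else s)
          (g.getD k PySem.Set.empty) := by
  intro clauses
  induction clauses with
  | nil => intro g k; rfl
  | cons c cs ih => intro g k; simp only [List.foldl_cons]; rw [ih, clauseStepA_getD]

-- A's items, canonically
theorem A_items (clauses : List (List Int)) :
    primal_graph_py clauses = (pgKeys clauses).map (fun k => (k, pgNb clauses k)) := by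
  unfold primal_graph_py
  have hk : (clauses.foldl pgA_clauseStep PySem.Dict.empty).keys = pgKeys clauses := by
    rw [foldA_keys]; rfl
  rw [PySem.Dict.items_eq_map_keys _ (by rw [hk]; exact nodup_pgKeys_fold clauses [] List.nodup_nil)
      PySem.Set.empty, hk]
  apply List.map_congr_left
  intro k _
  rw [foldA_getD]
  rfl

-- ===== B side =====

-- one occurrence step: keys and lookups
theorem occStep_keys (occ : PySem.Dict Int (List (List Int))) (c : List Int) :
    (pgB_occStep occ c).keys = PySem.Set.update occ.keys (pgVars c) := by
  simp only [pgB_occStep]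
  exact PySem.Dict.keys_foldl_modify _ _ (fun _ _ l => l ++ [_]) occ

theorem modFold_getD {ν : Type} (d0 : ν) (F : Int → ν → ν) :
    ∀ (vs : List Int), vs.Nodup →
      ∀ (g : PySem.Dict Int ν) (k : Int),
        (vs.foldl (fun g v => g.modify v d0 (F v)) g).getD k d0 =
          if k ∈ vs then F k (g.getD k d0) else g.getD k d0 := by
  intro vs
  induction vs with
  | nil => intro _ g k; simp
  | cons v rest ih =>
    intro hnd g k
    have hv : v ∉ rest := (List.nodup_cons.mp hnd).1
    simp only [List.foldl_cons]
    rw [ih (List.nodup_cons.mp hnd).2]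
    by_cases h1 : k = v
    · subst h1
      rw [if_neg hv, if_pos (List.mem_cons_self ..), PySem.Dict.getD_modify, if_pos rfl]
    · by_cases h2 : k ∈ rest
      · rw [if_pos h2, if_pos (List.mem_cons_of_mem _ h2), PySem.Dict.getD_modify, if_neg h1]
      · rw [if_neg h2, if_neg (by simp [h1, h2]), PySem.Dict.getD_modify, if_neg h1]

theorem occStep_getD (occ : PySem.Dict Int (List (List Int))) (c : List Int) (v : Int) :
    (pgB_occStep occ c).getD v [] =
      if v ∈ pgVars c then occ.getD v [] ++ [pgVars c] else occ.getD v [] := by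
  simp only [pgB_occStep]
  exact modFold_getD [] (fun _ l => l ++ [pgVars c]) (pgVars c) (nodup_pgVars c) occ v

theorem foldOcc_keys :
    ∀ (clauses : List (List Int)) (occ : PySem.Dict Int (List (List Int))),
      (clauses.foldl pgB_occStep occ).keys =
        clauses.foldl (fun ks c => PySem.Set.update ks (pgVars c)) occ.keys := by
  intro clauses
  induction clauses with
  | nil => intro occ; rfl
  | cons c cs ih => intro occ; simp only [List.foldl_cons]; rw [ih, occStep_keys]

theorem foldOcc_getD :
    ∀ (clauses : List (List Int)) (occ : PySem.Dict Int (List (List Int))) (v : Int),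
      (clauses.foldl pgB_occStep occ).getD v [] =
        clauses.foldl (fun l c => if v ∈ pgVars c then l ++ [pgVars c] else l) (occ.getD v []) := by
  intro clauses
  induction clauses with
  | nil => intro occ v; rfl
  | cons c cs ih => intro occ v; simp only [List.foldl_cons]; rw [ih, occStep_getD]

-- fusing the union over the collected occurrence list with the collection itself
theorem neighbors_fuse (v : Int) :
    ∀ (cs : List (List Int)) (acc : List (List Int)) (s : PySem.Set Int),
      (cs.foldl (fun l c => if v ∈ pgVars c then l ++ [pgVars c] else l) acc).foldl
          (fun nb vs => PySem.Set.update nb (vs.filter (fun w => !(w == v)))) s =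
        cs.foldl
          (fun t c => if v ∈ pgVars c then
              PySem.Set.update t ((pgVars c).filter (fun w => !(w == v))) else t)
          (acc.foldl (fun nb vs => PySem.Set.update nb (vs.filter (fun w => !(w == v)))) s) := by
  intro cs
  induction cs with
  | nil => intro acc s; rfl
  | cons c cs ih =>
    intro acc s
    simp only [List.foldl_cons]
    by_cases h : v ∈ pgVars c
    · rw [if_pos h, if_pos h, ih]
      simp [List.foldl_append]
    · rw [if_neg h, if_neg h, ih]

-- B's items, canonically
theorem B_items (clauses : List (List Int)) :
    primal_graph_py_alt clauses = (pgKeys clauses).map (fun k => (k, pgNb clauses k)) := by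
  unfold primal_graph_py_alt
  set occ := clauses.foldl pgB_occStep PySem.Dict.empty with hocc
  have hk : occ.keys = pgKeys clauses := by rw [hocc, foldOcc_keys]; rfl
  have hnd : occ.keys.Nodup := by
    rw [hk]; exact nodup_pgKeys_fold clauses [] List.nodup_nil
  have hitems : occ.items = occ.keys.map (fun v => (v, occ.getD v [])) :=
    PySem.Dict.items_eq_map_keys occ hnd []
  have hfresh := PySem.Dict.items_foldl_insert_fresh (l := occ.items)
    (k := fun p => p.1) (v := fun p => pgB_neighbors p.1 p.2)
    (d := (PySem.Dict.empty : PySem.Dict Int (PySem.Set Int)))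
    (fun a _ => PySem.Dict.contains_empty _) (by
      have : occ.items.map (fun p => p.1) = occ.keys := rfl
      rw [this]; exact hnd)
  simp only [hfresh]
  rw [hitems]
  simp only [List.map_map]
  rw [← hk]
  apply List.map_congr_left
  intro v _
  simp only [Function.comp]
  congr 1
  rw [foldOcc_getD]
  simp only [PySem.Dict.getD_empty]
  have := neighbors_fuse v clauses [] PySem.Set.empty
  simp only [pgB_neighbors]
  rw [this]
  rfl

-- ===== VERDICT (by name: the statement is the Claim_ definition above) =====
theorem primal_graph_py_spec : Claim_equal_primal_graph_py := by
  intro clauses _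
  unfold Spec_primal_graph_py
  rw [A_items, B_items]
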